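-- pv_equiv track=rewrite | github.com/vanbako/xzre-ghidra | scripts/map_locals.py | _allocate_name
-- ===== SOURCE A (Python) =====
-- def _allocate_name(base: str, used: set) -> str:
--     if base not in used:
--         used.add(base)
--         return base
--     idx = 1
--     while True:
--         candidate = "{}_{}".format(base, idx)
--         if candidate not in used:
--             used.add(candidate)
--             return candidate
--         idx += 1
-- ===== SOURCE B (Python) =====
-- def _parse_suffix(suf):
--     # canonical positive decimal numeral -> its value, else None
--     if not suf or suf[0] == "0":
--         return None
--     val = 0
--     for ch in suf:
--         if not ("0" <= ch <= "9"):
--             return None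
--         val = 10 * val + (ord(ch) - ord("0"))
--     return val
--
--
-- def _allocate_name(base: str, used: set) -> str:
--     pref = base + "_"
--     taken = set()
--     for name in used:
--         if name == base:
--             taken.add(0)
--         elif name.startswith(pref):
--             k = _parse_suffix(name[len(pref):])
--             if k is not None:
--                 taken.add(k)
--     k = 0
--     while k in taken:
--         k += 1
--     result = base if k == 0 else pref + str(k)
--     used.add(result)
--     return result
-- ===== Notes on version B (the rewrite author's own statement) =====
-- stated objective: alternative
-- what changed: Instead of probing the candidate strings base, base_1, base_2, ... against `used` one by one, B makes a single pass over `used` parsing each element's canonical numeric suffix into a set of taken integer indices and then returns the candidate at the mex (minimum excluded value) of that set; no candidate string is ever looked up in `used`.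
import Mathlib
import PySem

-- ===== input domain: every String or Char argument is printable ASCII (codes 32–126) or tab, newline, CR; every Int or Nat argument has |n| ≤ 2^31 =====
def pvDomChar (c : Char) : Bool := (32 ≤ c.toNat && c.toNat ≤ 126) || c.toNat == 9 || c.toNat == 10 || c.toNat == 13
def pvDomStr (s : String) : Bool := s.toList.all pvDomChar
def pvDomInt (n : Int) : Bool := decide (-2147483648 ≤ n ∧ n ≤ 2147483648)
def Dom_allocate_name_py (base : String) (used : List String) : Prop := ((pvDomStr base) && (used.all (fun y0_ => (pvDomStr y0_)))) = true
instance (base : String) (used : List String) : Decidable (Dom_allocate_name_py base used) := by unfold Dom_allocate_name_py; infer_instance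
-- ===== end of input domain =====

-- B replaces A's probing of candidate names against `used` by one pass over `used` that parses
-- each element's canonical numeric suffix into a set of taken indices, then takes the mex
-- (alternative algorithm); in Python both A and B also add the returned name to `used`
-- (same mutation) — the equivalence proved here is about the return value.

-- ===== PORT A =====
-- A's `while True` loop; the fuel `used.length + 1` is a totality guard only: the probed
-- candidates are pairwise distinct strings, so among the first `used.length + 1` one is
-- free and Python's loop never runs past it.
def allocateLoopA (base : String) (used : List String) (idx : Int) : Nat → String
  | 0 => ""
  | fuel + 1 =>
    let candidate := base ++ "_" ++ PySem.Int.toStr idx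
    if used.contains candidate then allocateLoopA base used (idx + 1) fuel
    else candidate

def allocate_name_py (base : String) (used : List String) : String :=
  if !used.contains base then base
  else allocateLoopA base used 1 (used.length + 1)

-- ===== PORT B =====
-- Source B's `_parse_suffix` loop body, step for step (early `return None` on a non-digit char).
def parseGoB : List Char → Int → Option Int
  | [], v => some v
  | c :: rest, v =>
    if '0' ≤ c ∧ c ≤ '9' then parseGoB rest (10 * v + ((c.toNat : Int) - 48)) else none

-- Source B's `_parse_suffix`: empty / leading-zero check, then the digit loop.
def parse_suffix_py (suf : String) : Option Int :=
  match suf.toList with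
  | [] => none
  | c :: _ => if c = '0' then none else parseGoB suf.toList 0

-- the body of Source B's `for name in used` loop (building the set of taken indices)
def takenStepB (base pref : String) (s : PySem.Set Int) (name : String) : PySem.Set Int :=
  if name = base then PySem.Set.add s 0
  else if PySem.Str.startswith name pref then
    match parse_suffix_py (PySem.Str.slice name (some (pref.length : Int)) none) with
    | some k => PySem.Set.add s k
    | none => s
  else s

-- Source B's `while k in taken` mex loop; the fuel `used.length + 2` is a totality guard only:
-- `taken` has at most `used.length` elements, so the mex is reached within the fuel.
def mexLoopB (taken : PySem.Set Int) (k : Int) : Nat → Int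
  | 0 => k
  | fuel + 1 => if PySem.Set.contains taken k then mexLoopB taken (k + 1) fuel else k

def allocate_name_py_alt (base : String) (used : List String) : String :=
  let pref := base ++ "_"
  let taken := used.foldl (takenStepB base pref) PySem.Set.empty
  let k := mexLoopB taken 0 (used.length + 2)
  if k = 0 then base else pref ++ PySem.Int.toStr k

-- ===== PRECONDITION & SPEC =====
def Spec_allocate_name_py (base : String) (used : List String) (out : String) : Prop := out = allocate_name_py_alt base used
instance (base : String) (used : List String) (out : String) : Decidable (Spec_allocate_name_py base used out) := by unfold Spec_allocate_name_py; infer_instance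

-- ===== CLAIM (what is proved, stated in full; the proofs are below) =====
def Claim_equal_allocate_name_py : Prop := ∀ (base : String) (used : List String), Dom_allocate_name_py base used → Spec_allocate_name_py base used (allocate_name_py base used)

-- ===== LEMMAS AND PROOFS =====

theorem digitChar_toNat (d : Nat) (hd : d < 10) : (Nat.digitChar d).toNat = 48 + d := by
  interval_cases d <;> decide

theorem digitChar_isdigit (d : Nat) (hd : d < 10) :
    '0' ≤ Nat.digitChar d ∧ Nat.digitChar d ≤ '9' := by
  interval_cases d <;> decide

theorem digitChar_ne_zero (d : Nat) (hd : d < 10) (h0 : d ≠ 0) : Nat.digitChar d ≠ '0' := by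
  interval_cases d <;> simp_all <;> decide

theorem char_eq_digitChar (c : Char) (h0 : '0' ≤ c) (h9 : c ≤ '9') :
    c = Nat.digitChar (c.toNat - 48) ∧ c.toNat - 48 < 10 := by
  rw [Char.le_def, UInt32.le_iff_toNat_le] at h0 h9
  have h0' : 48 ≤ c.toNat := h0
  have h9' : c.toNat ≤ 57 := h9
  refine ⟨?_, by omega⟩
  have ht : (Nat.digitChar (c.toNat - 48)).toNat = c.toNat := by
    rw [digitChar_toNat _ (by omega)]; omega
  exact (Char.ext (UInt32.toNat_inj.mp ht)).symm

theorem toDigitsCore_succ (b f n : Nat) (acc : List Char) :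
    Nat.toDigitsCore b (f + 1) n acc =
      if n / b = 0 then (n % b).digitChar :: acc
      else Nat.toDigitsCore b f (n / b) ((n % b).digitChar :: acc) := by
  simp [Nat.toDigitsCore]

theorem toDigitsCore_eq (f : Nat) : ∀ (n : Nat) (acc : List Char), 0 < n → n < 10 ^ f →
    Nat.toDigitsCore 10 f n acc = ((Nat.digits 10 n).map Nat.digitChar).reverse ++ acc := by
  induction f with
  | zero => intro n acc hn hf; omega
  | succ f ih =>
    intro n acc hn hf
    rw [toDigitsCore_succ]
    rw [Nat.digits_def' (by norm_num) hn]
    by_cases h : n / 10 = 0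
    · rw [if_pos h]
      have : Nat.digits 10 (n / 10) = [] := by rw [h]; simp
      simp [this]
    · rw [if_neg h]
      rw [ih (n / 10) _ (Nat.pos_of_ne_zero h) (by omega)]
      simp

theorem toDigits10_eq (n : Nat) (hn : 0 < n) :
    Nat.toDigits 10 n = ((Nat.digits 10 n).map Nat.digitChar).reverse := by
  have hlt : n < 10 ^ (n + 1) := by
    calc n < 2 ^ n := Nat.lt_two_pow_self
    _ ≤ 10 ^ n := Nat.pow_le_pow_left (by norm_num) n
    _ ≤ 10 ^ (n + 1) := Nat.pow_le_pow_right (by norm_num) (Nat.le_succ n)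
  simpa using toDigitsCore_eq (n + 1) n [] hn hlt

theorem toChars_pos (k : Int) (hk : 1 ≤ k) :
    PySem.Int.toChars k = ((Nat.digits 10 k.toNat).map Nat.digitChar).reverse := by
  unfold PySem.Int.toChars
  rw [if_neg (by omega)]
  exact toDigits10_eq k.toNat (by omega)

-- the value Source B's digit loop accumulates over a digit list (most significant first)
def valGo : List Nat → Int → Int
  | [], v => v
  | d :: tl, v => valGo tl (10 * v + (d : Int))

theorem valGo_append (l1 l2 : List Nat) (v : Int) :
    valGo (l1 ++ l2) v = valGo l2 (valGo l1 v) := by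
  induction l1 generalizing v with
  | nil => rfl
  | cons d tl ih => simp only [List.cons_append, valGo, ih]

theorem valGo_reverse (L : List Nat) (v : Int) :
    valGo L.reverse v = v * 10 ^ L.length + ((Nat.ofDigits (10 : Nat) L : Nat) : Int) := by
  induction L generalizing v with
  | nil => simp [valGo]
  | cons d tl ih =>
    simp only [List.reverse_cons, valGo_append, ih, valGo, List.length_cons]
    rw [Nat.ofDigits_cons]
    push_cast
    ring

theorem parseGoB_digits : ∀ (es : List Nat) (v : Int), (∀ d ∈ es, d < 10) →
    parseGoB (es.map Nat.digitChar) v = some (valGo es v) := by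
  intro es
  induction es with
  | nil => intro v _; simp [parseGoB, valGo]
  | cons d tl ih =>
    intro v h
    have hd : d < 10 := h d (by simp)
    have hcond : '0' ≤ Nat.digitChar d ∧ Nat.digitChar d ≤ '9' := digitChar_isdigit d hd
    simp only [List.map_cons, parseGoB]
    rw [if_pos hcond, ih _ (fun x hx => h x (List.mem_cons_of_mem _ hx))]
    have hacc : 10 * v + (((Nat.digitChar d).toNat : Int) - 48) = 10 * v + (d : Int) := by
      rw [digitChar_toNat d hd]; push_cast; ring
    rw [hacc]
    rfl

theorem parseGoB_some : ∀ (cs : List Char) (v0 v : Int), parseGoB cs v0 = some v →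
    ∃ es : List Nat, cs = es.map Nat.digitChar ∧ (∀ d ∈ es, d < 10) ∧ v = valGo es v0 := by
  intro cs
  induction cs with
  | nil =>
    intro v0 v h
    simp only [parseGoB, Option.some_inj] at h
    exact ⟨[], rfl, by simp, by simp [valGo, h]⟩
  | cons c tl ih =>
    intro v0 v h
    simp only [parseGoB] at h
    split_ifs at h with hc
    · obtain ⟨h0, h9⟩ := hc
      obtain ⟨hcd, hdlt⟩ := char_eq_digitChar c h0 h9
      obtain ⟨es, hes, hlt, hval⟩ := ih _ _ h
      refine ⟨(c.toNat - 48) :: es, ?_, ?_, ?_⟩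
      · simp only [List.map_cons, ← hcd, hes]
      · intro d hd
        rcases List.mem_cons.mp hd with rfl | hd
        · exact hdlt
        · exact hlt d hd
      · have h48 : 48 ≤ c.toNat := by
          rw [Char.le_def, UInt32.le_iff_toNat_le] at h0
          exact h0
        simp only [valGo]
        rw [hval]
        congr 1
        omega

-- Source B's parser accepts exactly the strings str(k), k ≥ 1, and returns k on them
theorem parseChars_toChars (k : Int) (hk : 1 ≤ k) :
    (match PySem.Int.toChars k with
      | [] => none
      | c :: _ => if c = '0' then none else parseGoB (PySem.Int.toChars k) 0) = some k := by
  have hk0 : k.toNat ≠ 0 := by omega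
  have hdig : ∀ d ∈ Nat.digits 10 k.toNat, d < 10 :=
    fun d hd => Nat.digits_lt_base (by norm_num) hd
  have hne : Nat.digits 10 k.toNat ≠ [] := Nat.digits_ne_nil_iff_ne_zero.mpr hk0
  have hchars : PySem.Int.toChars k =
      ((Nat.digits 10 k.toNat).reverse).map Nat.digitChar := by
    rw [toChars_pos k hk, List.map_reverse]
  have hrevne : (Nat.digits 10 k.toNat).reverse ≠ [] := by simpa using hne
  obtain ⟨hd0, tl, hrev⟩ := List.exists_cons_of_ne_nil hrevne
  have hdd : Nat.digits 10 k.toNat = tl.reverse ++ [hd0] := by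
    rw [← List.reverse_reverse (Nat.digits 10 k.toNat), hrev]
    simp
  have hhd0 : hd0 ≠ 0 := by
    have hlast := Nat.getLast_digit_ne_zero 10 hk0
    have h1 : (Nat.digits 10 k.toNat).getLast? = some hd0 := by
      rw [hdd]
      simp
    have h2 : (Nat.digits 10 k.toNat).getLast? =
        some ((Nat.digits 10 k.toNat).getLast (Nat.digits_ne_nil_iff_ne_zero.mpr hk0)) :=
      List.getLast?_eq_some_getLast _
    have h3 : (Nat.digits 10 k.toNat).getLast (Nat.digits_ne_nil_iff_ne_zero.mpr hk0) = hd0 :=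
      Option.some_inj.mp (h2.symm.trans h1)
    rw [← h3]
    exact hlast
  have hmemrev : ∀ d, d ∈ hd0 :: tl → d ∈ Nat.digits 10 k.toNat := by
    intro d hdm
    have : d ∈ (Nat.digits 10 k.toNat).reverse := by rw [hrev]; exact hdm
    exact List.mem_reverse.mp this
  have hhd10 : hd0 < 10 := hdig hd0 (hmemrev hd0 (by simp))
  have hall : ∀ d ∈ hd0 :: tl, d < 10 := fun d hdm => hdig d (hmemrev d hdm)
  have harg : PySem.Int.toChars k = (hd0 :: tl).map Nat.digitChar := by
    rw [hchars, hrev]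
  rw [harg, List.map_cons]
  show (if Nat.digitChar hd0 = '0' then none
    else parseGoB (Nat.digitChar hd0 :: tl.map Nat.digitChar) 0) = some k
  rw [if_neg (digitChar_ne_zero hd0 hhd10 hhd0)]
  show parseGoB ((hd0 :: tl).map Nat.digitChar) 0 = some k
  rw [parseGoB_digits (hd0 :: tl) 0 hall, ← hrev, valGo_reverse]
  simp only [zero_mul, zero_add, Nat.ofDigits_digits, Option.some_inj]
  omega

theorem parseChars_inv (cs : List Char) (v : Int)
    (h : (match cs with
      | [] => none
      | c :: _ => if c = '0' then none else parseGoB cs 0) = some v) :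
    1 ≤ v ∧ cs = PySem.Int.toChars v := by
  match cs, h with
  | c :: rest, h =>
    rw [show (match c :: rest with
      | [] => (none : Option Int)
      | c :: _ => if c = '0' then none else parseGoB (c :: rest) 0) =
        if c = '0' then none else parseGoB (c :: rest) 0 from rfl] at h
    split_ifs at h with hc0
    obtain ⟨es, hes, hlt, hval⟩ := parseGoB_some _ _ _ h
    have hesne : es ≠ [] := by
      intro hz; rw [hz] at hes; cases hes
    obtain ⟨e0, etl, rfl⟩ := List.exists_cons_of_ne_nil hesne
    have hce : c = Nat.digitChar e0 := by
      simpa using congrArg List.headI hes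
    have he0 : e0 ≠ 0 := by
      intro hz
      apply hc0
      rw [hce, hz]
      rfl
    have hLlt : ∀ d ∈ (e0 :: etl).reverse, d < 10 := by
      intro d hdm
      exact hlt d (List.mem_reverse.mp hdm)
    have hLlast : ∀ (hh : (e0 :: etl).reverse ≠ []), ((e0 :: etl).reverse).getLast hh ≠ 0 := by
      intro hh
      rw [List.getLast_reverse]
      simpa using he0
    have hv : v = ((Nat.ofDigits (10 : Nat) ((e0 :: etl).reverse) : Nat) : Int) := by
      rw [hval, ← List.reverse_reverse (e0 :: etl), valGo_reverse]
      simp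
    have hdigL : Nat.digits 10 (Nat.ofDigits 10 ((e0 :: etl).reverse)) = (e0 :: etl).reverse :=
      Nat.digits_ofDigits 10 (by norm_num) _ hLlt hLlast
    have hofne : Nat.ofDigits 10 ((e0 :: etl).reverse) ≠ 0 := by
      intro hz
      rw [hz] at hdigL
      simp at hdigL
    have hv1 : 1 ≤ v := by
      rw [hv]
      exact_mod_cast Nat.one_le_iff_ne_zero.mpr hofne
    refine ⟨hv1, ?_⟩
    rw [toChars_pos v hv1]
    have hvt : v.toNat = Nat.ofDigits 10 ((e0 :: etl).reverse) := by rw [hv]; simp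
    rw [hvt, hdigL, hes]
    simp [List.map_reverse]

-- parse_suffix_py in terms of the chars-level match
theorem parse_suffix_py_eq (suf : String) :
    parse_suffix_py suf = (match suf.toList with
      | [] => none
      | c :: _ => if c = '0' then none else parseGoB suf.toList 0) := rfl

theorem parse_suffix_toStr (k : Int) (hk : 1 ≤ k) :
    parse_suffix_py (PySem.Int.toStr k) = some k := by
  rw [parse_suffix_py_eq, PySem.Int.toList_toStr]
  exact parseChars_toChars k hk

theorem parse_suffix_inv (suf : String) (v : Int) (h : parse_suffix_py suf = some v) :
    1 ≤ v ∧ suf = PySem.Int.toStr v := by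
  rw [parse_suffix_py_eq] at h
  obtain ⟨h1, h2⟩ := parseChars_inv suf.toList v h
  refine ⟨h1, String.ext ?_⟩
  rw [PySem.Int.toList_toStr, h2]

-- candidate names are injective in the index
theorem cand_inj (base : String) (j j' : Int) (hj : 1 ≤ j) (hj' : 1 ≤ j')
    (h : base ++ "_" ++ PySem.Int.toStr j = base ++ "_" ++ PySem.Int.toStr j') : j = j' := by
  have := congrArg String.toList h
  simp only [String.toList_append] at this
  have hts : PySem.Int.toStr j = PySem.Int.toStr j' := by
    apply String.ext
    rw [PySem.Int.toList_toStr, PySem.Int.toList_toStr]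
    have := List.append_cancel_left this
    rwa [PySem.Int.toList_toStr, PySem.Int.toList_toStr] at this
  have h1 := parse_suffix_toStr j hj
  rw [hts, parse_suffix_toStr j' hj'] at h1
  exact (Option.some_inj.mp h1).symm

-- the condition under which Source B's loop marks index k for element `name`
def takenCond (base pref : String) (name : String) (k : Int) : Prop :=
  (name = base ∧ k = 0) ∨
    (name ≠ base ∧ PySem.Str.startswith name pref = true ∧
      parse_suffix_py (PySem.Str.slice name (some (pref.length : Int)) none) = some k)

theorem mem_takenStep (base pref : String) (s : PySem.Set Int) (name : String) (k : Int) :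
    k ∈ takenStepB base pref s name ↔ k ∈ s ∨ takenCond base pref name k := by
  unfold takenStepB takenCond
  split_ifs with h1 h2
  · rw [PySem.Set.mem_add]
    constructor
    · rintro (h | h)
      · exact Or.inl h
      · exact Or.inr (Or.inl ⟨h1, h⟩)
    · rintro (h | ⟨_, h⟩ | ⟨hne, _⟩)
      · exact Or.inl h
      · exact Or.inr h
      · exact absurd h1 hne
  · cases hp : parse_suffix_py (PySem.Str.slice name (some (pref.length : Int)) none) with
    | none =>
      show k ∈ s ↔ _
      constructor
      · exact Or.inl
      · rintro (h | ⟨hb, _⟩ | ⟨_, _, h⟩)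
        · exact h
        · exact absurd hb h1
        · exact absurd h (by simp)
    | some v =>
      show k ∈ PySem.Set.add s v ↔ _
      rw [PySem.Set.mem_add]
      constructor
      · rintro (h | rfl)
        · exact Or.inl h
        · exact Or.inr (Or.inr ⟨h1, h2, rfl⟩)
      · rintro (h | ⟨hb, _⟩ | ⟨_, _, h⟩)
        · exact Or.inl h
        · exact absurd hb h1
        · exact Or.inr (Option.some_inj.mp h).symm
  · constructor
    · exact Or.inl
    · rintro (h | ⟨hb, _⟩ | ⟨_, hs, _⟩)
      · exact h
      · exact absurd hb h1
      · exact absurd hs h2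

theorem mem_foldl_takenStep (base pref : String) :
    ∀ (l : List String) (s : PySem.Set Int) (k : Int),
      k ∈ l.foldl (takenStepB base pref) s ↔ k ∈ s ∨ ∃ name ∈ l, takenCond base pref name k := by
  intro l
  induction l with
  | nil => intro s k; simp
  | cons x tl ih =>
    intro s k
    simp only [List.foldl_cons, ih, mem_takenStep, List.mem_cons]
    constructor
    · rintro ((h | h) | ⟨n, hn, hc⟩)
      · exact Or.inl h
      · exact Or.inr ⟨x, Or.inl rfl, h⟩
      · exact Or.inr ⟨n, Or.inr hn, hc⟩
    · rintro (h | ⟨n, (rfl | hn), hc⟩)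
      · exact Or.inl (Or.inl h)
      · exact Or.inl (Or.inr hc)
      · exact Or.inr ⟨n, hn, hc⟩

-- takenCond with pref = base ++ "_" characterised by candidate-name membership
theorem takenCond_iff (base : String) (name : String) (k : Int) :
    takenCond base (base ++ "_") name k ↔
      (k = 0 ∧ name = base) ∨ (1 ≤ k ∧ name = base ++ "_" ++ PySem.Int.toStr k) := by
  have htne : ∀ (j : Int), 1 ≤ j → (PySem.Int.toStr j).toList ≠ [] := by
    intro j hj hz
    have hps := parse_suffix_toStr j hj
    rw [parse_suffix_py_eq, hz] at hps
    cases hps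
  have hlen : ∀ (j : Int), 1 ≤ j → base ++ "_" ++ PySem.Int.toStr j ≠ base := by
    intro j hj h
    have hq := congrArg (fun s => s.toList.length) h
    simp only [String.toList_append, List.length_append] at hq
    have hpos : 0 < (PySem.Int.toStr j).toList.length :=
      List.length_pos_iff.mpr (htne j hj)
    have h1 : ("_" : String).toList.length = 1 := rfl
    omega
  constructor
  · rintro (⟨rfl, rfl⟩ | ⟨hne, hsw, hp⟩)
    · exact Or.inl ⟨rfl, rfl⟩
    · obtain ⟨h1, hsuf⟩ := parse_suffix_inv _ _ hp
      refine Or.inr ⟨h1, ?_⟩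
      rw [PySem.Str.startswith_eq, PySem.Chars.startswith_iff] at hsw
      have hdecomp := List.prefix_iff_eq_append.mp hsw
      have hslice : (PySem.Str.slice name (some ((base ++ "_").length : Int)) none).toList =
          name.toList.drop (base ++ "_").length := by
        rw [PySem.Str.toList_slice, PySem.Chars.slice_eq_listSlice,
          PySem.List.slice_from_natCast]
      have h2 : name.toList.drop (base ++ "_").toList.length = (PySem.Int.toStr k).toList := by
        show name.toList.drop (base ++ "_").length = (PySem.Int.toStr k).toList
        rw [← hslice, hsuf]
      apply String.ext
      rw [← hdecomp, h2, String.toList_append, String.toList_append, String.toList_append]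
  · rintro (⟨rfl, rfl⟩ | ⟨h1, rfl⟩)
    · exact Or.inl ⟨rfl, rfl⟩
    · refine Or.inr ⟨hlen k h1, ?_, ?_⟩
      · rw [PySem.Str.startswith_eq, PySem.Chars.startswith_iff]
        refine ⟨(PySem.Int.toStr k).toList, ?_⟩
        rw [String.toList_append, String.toList_append]
        simp
      · have hslice : PySem.Str.slice (base ++ "_" ++ PySem.Int.toStr k)
            (some ((base ++ "_").length : Int)) none = PySem.Int.toStr k := by
          apply String.ext
          rw [PySem.Str.toList_slice, PySem.Chars.slice_eq_listSlice,
            PySem.List.slice_from_natCast]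
          show List.drop ((base ++ "_").toList).length
              ((base ++ "_" ++ PySem.Int.toStr k).toList) = (PySem.Int.toStr k).toList
          rw [String.toList_append (s := base ++ "_") (t := PySem.Int.toStr k)]
          exact List.drop_left
        rw [hslice]
        exact parse_suffix_toStr k h1

theorem mem_taken_iff (base : String) (used : List String) (k : Int) :
    k ∈ used.foldl (takenStepB base (base ++ "_")) PySem.Set.empty ↔
      (k = 0 ∧ base ∈ used) ∨ (1 ≤ k ∧ (base ++ "_" ++ PySem.Int.toStr k) ∈ used) := by
  rw [mem_foldl_takenStep]
  simp only [PySem.Set.empty, List.not_mem_nil, false_or]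
  constructor
  · rintro ⟨name, hn, hc⟩
    rcases (takenCond_iff base name k).mp hc with ⟨h0, rfl⟩ | ⟨h1, rfl⟩
    · exact Or.inl ⟨h0, hn⟩
    · exact Or.inr ⟨h1, hn⟩
  · rintro (⟨rfl, hb⟩ | ⟨h1, hb⟩)
    · exact ⟨base, hb, (takenCond_iff base base 0).mpr (Or.inl ⟨rfl, rfl⟩)⟩
    · exact ⟨_, hb, (takenCond_iff base _ k).mpr (Or.inr ⟨h1, rfl⟩)⟩

theorem mexLoopB_ge : ∀ (f : Nat) (taken : PySem.Set Int) (k : Int), k ≤ mexLoopB taken k f := by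
  intro f
  induction f with
  | zero => intro taken k; simp [mexLoopB]
  | succ f ih =>
    intro taken k
    simp only [mexLoopB]
    split_ifs
    · exact le_trans (by omega) (ih taken (k + 1))
    · exact le_refl k

-- the two loops run in lockstep once their membership tests agree
theorem lockstep (base : String) (used : List String) (taken : PySem.Set Int)
    (htaken : ∀ j : Int, 1 ≤ j →
      (PySem.Set.contains taken j = used.contains (base ++ "_" ++ PySem.Int.toStr j))) :
    ∀ (f : Nat) (k : Int), 1 ≤ k →
      (∃ n : Nat, n < f ∧ (base ++ "_" ++ PySem.Int.toStr (k + n)) ∉ used) →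
      allocateLoopA base used k f = (base ++ "_") ++ PySem.Int.toStr (mexLoopB taken k f) := by
  intro f
  induction f with
  | zero => rintro k hk ⟨n, hn, _⟩; omega
  | succ f ih =>
    rintro k hk ⟨n, hn, hfree⟩
    simp only [allocateLoopA, mexLoopB]
    rw [htaken k hk]
    cases hc : used.contains (base ++ "_" ++ PySem.Int.toStr k) with
    | true =>
      rw [if_pos rfl, if_pos rfl]
      have hn0 : n ≠ 0 := by
        rintro rfl
        exact hfree (by simpa using List.contains_iff_mem.mp hc)
      refine ih (k + 1) (by omega) ⟨n - 1, by omega, ?_⟩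
      have : k + 1 + ((n - 1 : Nat) : Int) = k + (n : Int) := by
        have : (1 : Int) ≤ (n : Int) := by exact_mod_cast Nat.one_le_iff_ne_zero.mpr hn0
        push_cast [Nat.cast_sub (Nat.one_le_iff_ne_zero.mpr hn0)]
        ring
      rwa [this]
    | false =>
      rw [if_neg (by simp), if_neg (by simp)]

-- pigeonhole: among used.length + 1 distinct candidates one is free
theorem exists_free (base : String) (used : List String) :
    ∃ n : Nat, n < used.length + 1 ∧
      (base ++ "_" ++ PySem.Int.toStr (1 + (n : Int))) ∉ used := by
  by_contra hcon
  push_neg at hcon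
  set l : List String := (List.range (used.length + 1)).map
    (fun (n : Nat) => base ++ "_" ++ PySem.Int.toStr (1 + (n : Int))) with hl
  have hnodup : l.Nodup := by
    rw [hl]
    apply List.Nodup.map_on _ (List.nodup_range)
    intro n hn m hm h
    have := cand_inj base _ _ (by omega) (by omega) h
    omega
  have hsub : ∀ x ∈ l, x ∈ used := by
    intro x hx
    rw [hl] at hx
    simp only [List.mem_map, List.mem_range] at hx
    obtain ⟨n, hn, rfl⟩ := hx
    exact hcon n hn
  have hcard : l.toFinset.card = used.length + 1 := by
    rw [List.toFinset_card_of_nodup hnodup, hl]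
    simp
  have hle : l.toFinset.card ≤ used.toFinset.card := by
    apply Finset.card_le_card
    intro x hx
    rw [List.mem_toFinset] at hx ⊢
    exact hsub x hx
  have := List.toFinset_card_le used
  omega

-- ===== VERDICT (by name: the statement is the Claim_ definition above) =====
theorem allocate_name_py_spec : Claim_equal_allocate_name_py := by
  intro base used _
  unfold Spec_allocate_name_py allocate_name_py allocate_name_py_alt
  dsimp only
  set taken := used.foldl (takenStepB base (base ++ "_")) PySem.Set.empty with htk
  have hcont : ∀ j : Int, PySem.Set.contains taken j = true ↔ j ∈ taken := by
    intro j
    simp [PySem.Set.contains_eq_listContains]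
  have htaken : ∀ j : Int, 1 ≤ j →
      PySem.Set.contains taken j = used.contains (base ++ "_" ++ PySem.Int.toStr j) := by
    intro j hj
    rw [Bool.eq_iff_iff, hcont, List.contains_iff_mem, htk, mem_taken_iff]
    constructor
    · rintro (⟨h0, _⟩ | ⟨_, h⟩)
      · omega
      · exact h
    · intro h
      exact Or.inr ⟨hj, h⟩
  cases hb : used.contains base with
  | false =>
    rw [if_pos (by simp)]
    have h0 : PySem.Set.contains taken 0 = false := by
      rw [← Bool.not_eq_true]
      intro h
      rcases (mem_taken_iff base used 0).mp ((hcont 0).mp h) with ⟨_, hm⟩ | ⟨h1, _⟩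
      · have hc := (List.contains_iff_mem (a := base) (as := used)).mpr hm
        rw [hb] at hc
        cases hc
      · omega
    rw [show used.length + 2 = (used.length + 1) + 1 from rfl]
    simp only [mexLoopB, h0, Bool.false_eq_true, if_false]
    norm_num
  | true =>
    rw [if_neg (by simp)]
    have h0 : PySem.Set.contains taken 0 = true := by
      rw [hcont, htk, mem_taken_iff]
      exact Or.inl ⟨rfl, List.contains_iff_mem.mp hb⟩
    rw [show used.length + 2 = (used.length + 1) + 1 from rfl]
    have hmex1 : mexLoopB taken 0 ((used.length + 1) + 1) = mexLoopB taken 1 (used.length + 1) := by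
      simp only [mexLoopB, h0, if_true]
      norm_num
    rw [hmex1]
    have hge := mexLoopB_ge (used.length + 1) taken 1
    rw [if_neg (by omega)]
    exact lockstep base used taken htaken (used.length + 1) 1 (by omega)
      (by simpa using exists_free base used)
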